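-- pv_equiv track=rewrite | github.com/poolbule0/jz8cubemax | utils/register_calc.py | calculate_port_pull
-- ===== SOURCE A (Python) =====
-- from typing import List
--
-- def calculate_port_pull(pull_list: List[int], invert: bool = False) -> int:
--     """
--     计算上拉/下拉寄存器值
--
--     Args:
--         pull_list: 上拉/下拉配置列表
--         invert: 是否反转逻辑（对于开漏、弱驱动、唤醒等）
--
--     Returns:
--         寄存器值
--     """
--     value = 0
--     for i, pull_val in enumerate(pull_list):
--         if invert:
--             # 对于开漏、弱驱动、唤醒：0=禁止，1=使能
--             if pull_val == 1:  # 使能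
--                 value |= (1 << i)
--         else:
--             # 对于上拉/下拉：0=使能，1=禁止
--             # 寄存器位：0=使能，1=禁止
--             # 所以如果配置是1（禁止），寄存器位应该是1
--             if pull_val == 1:  # 禁止，寄存器位设为1
--                 value |= (1 << i)
--             # 如果配置是0（使能），寄存器位应该是0，不需要设置
--     return value
-- ===== SOURCE B (Python) =====
-- from typing import List
--
-- def calculate_port_pull(pull_list: List[int], invert: bool = False) -> int:
--     # Build the register as a binary string, index 0 = least-significant bit.
--     # The invert flag changes nothing: both branches of A set the bit iff the
--     # configured value equals 1.
--     if not pull_list: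
--         return 0
--     bits = ''.join('1' if v == 1 else '0' for v in reversed(pull_list))
--     return int(bits, 2)
-- ===== Notes on version B (the rewrite author's own statement) =====
-- stated objective: idiomatic
-- what changed: B assembles a binary string (index 0 as LSB, via reversed) and parses it with int(bits, 2) instead of A's enumerate loop that ORs 1<<i into an accumulator; B also drops the dead invert branch, whose two arms in A are identical.
import Mathlib
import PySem

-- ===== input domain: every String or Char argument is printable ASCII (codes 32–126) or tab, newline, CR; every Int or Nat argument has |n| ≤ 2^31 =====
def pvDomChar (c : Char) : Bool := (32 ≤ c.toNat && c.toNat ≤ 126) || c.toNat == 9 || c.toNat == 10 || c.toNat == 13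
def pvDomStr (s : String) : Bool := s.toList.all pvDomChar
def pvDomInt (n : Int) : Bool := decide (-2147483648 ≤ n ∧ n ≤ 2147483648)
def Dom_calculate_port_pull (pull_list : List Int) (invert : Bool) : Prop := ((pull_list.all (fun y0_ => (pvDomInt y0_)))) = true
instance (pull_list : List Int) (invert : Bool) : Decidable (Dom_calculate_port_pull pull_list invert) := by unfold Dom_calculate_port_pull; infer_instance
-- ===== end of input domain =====

-- B builds a binary string (index 0 = LSB) and parses it base 2, instead of A's
-- enumerate loop ORing 1<<i into an accumulator; alternative decomposition, same cost.


-- ===== PORT A =====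
-- enumerate index i is an Int ≥ 0 (start 0); `1 << i` is ported as `(1 : Int) <<< i.toNat`,
-- exact for the nonnegative indices enumerate produces.
def calculate_port_pull (pull_list : List Int) (invert : Bool) : Int :=
  (PySem.List.enumerate pull_list).foldl
    (fun (value : Int) (ip : Int × Int) =>
      if invert then
        (if ip.2 == 1 then PySem.Int.bor value ((1 : Int) <<< ip.1.toNat) else value)
      else
        (if ip.2 == 1 then PySem.Int.bor value ((1 : Int) <<< ip.1.toNat) else value))
    0

-- ===== PORT B =====
-- `int(bits, 2)` is ported step for step as the standard base-2 left fold; exact here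
-- because `bits` is a nonempty string of '0'/'1' characters only.
def calculate_port_pull_alt (pull_list : List Int) (invert : Bool) : Int :=
  if pull_list.isEmpty then 0
  else
    let bits : List Char := pull_list.reverse.map (fun v => if v == 1 then '1' else '0')
    bits.foldl (fun acc c => acc * 2 + (if c == '1' then 1 else 0)) 0

-- ===== PRECONDITION & SPEC =====
def Spec_calculate_port_pull (pull_list : List Int) (invert : Bool) (out : Int) : Prop := out = calculate_port_pull_alt pull_list invert
instance (pull_list : List Int) (invert : Bool) (out : Int) : Decidable (Spec_calculate_port_pull pull_list invert out) := by unfold Spec_calculate_port_pull; infer_instance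

-- ===== CLAIM (what is proved, stated in full; the proofs are below) =====
def Claim_equal_calculate_port_pull : Prop := ∀ (pull_list : List Int) (invert : Bool), Dom_calculate_port_pull pull_list invert → Spec_calculate_port_pull pull_list invert (calculate_port_pull pull_list invert)

-- ===== LEMMAS AND PROOFS =====

-- common specification: binary value of the list, head = least-significant bit
def pvBits (pl : List Int) : Nat :=
  match pl with
  | [] => 0
  | p :: r => (if p = 1 then 1 else 0) + 2 * pvBits r

theorem pv_lor_two_pow {n k : Nat} (h : n < 2 ^ k) : n ||| 2 ^ k = n + 2 ^ k := by
  induction k generalizing n with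
  | zero =>
    interval_cases n
    decide
  | succ k ih =>
    have hn2 : n / 2 < 2 ^ k := by
      have := Nat.pow_succ 2 k
      omega
    have h1 : Nat.bit (decide (n % 2 = 1)) (n >>> 1) = n :=
      Nat.bit_decide_mod_two_eq_one_shiftRight_one n
    have h2 : Nat.bit false (2 ^ k) = 2 ^ (k + 1) := by
      rw [Nat.bit_val, Nat.pow_succ]
      simp [Nat.mul_comm]
    calc n ||| 2 ^ (k + 1)
        = Nat.bit (decide (n % 2 = 1)) (n >>> 1) ||| Nat.bit false (2 ^ k) := by rw [h1, h2]
      _ = Nat.bit (decide (n % 2 = 1) || false) (n >>> 1 ||| 2 ^ k) := Nat.lor_bit ..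
      _ = n + 2 ^ (k + 1) := by
          rw [Nat.shiftRight_one, ih hn2, Bool.or_false, Nat.bit_val]
          have hb : (decide (n % 2 = 1)).toNat = n % 2 := by
            rcases Nat.mod_two_eq_zero_or_one n with hm | hm <;> simp [hm]
          have hp2 : 2 ^ (k + 1) = 2 * 2 ^ k := by rw [Nat.pow_succ]; ring
          omega

theorem pv_shiftLeft_int (k : Nat) : (1 : Int) <<< k = ((2 ^ k : Nat) : Int) := by
  rw [Int.shiftLeft_eq]
  simp

-- A's fold over `enumerate pl ↑k`, started at a value below 2^k, adds 2^k * pvBits pl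
theorem pvA_fold (pl : List Int) (k n : Nat) (h : n < 2 ^ k) :
    (PySem.List.enumerate pl (k : Int)).foldl
      (fun (value : Int) (ip : Int × Int) => if ip.2 == 1 then PySem.Int.bor value ((1 : Int) <<< ip.1.toNat) else value)
      ((n : Nat) : Int) = ((n + 2 ^ k * pvBits pl : Nat) : Int) := by
  induction pl generalizing k n with
  | nil => simp [PySem.List.enumerate_nil, pvBits]
  | cons p r ih =>
    rw [PySem.List.enumerate_cons]
    simp only [List.foldl_cons]
    have hk1 : ((k : Int) + 1) = ((k + 1 : Nat) : Int) := by push_cast; ring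
    by_cases hp : p = 1
    · have hstep : (if p == 1 then PySem.Int.bor ((n : Nat) : Int) ((1 : Int) <<< ((k : Int)).toNat) else ((n : Nat) : Int))
          = ((n + 2 ^ k : Nat) : Int) := by
        rw [if_pos (by simp [hp]), Int.toNat_natCast, pv_shiftLeft_int,
          PySem.Int.bor_natCast, pv_lor_two_pow h]
      rw [hstep, hk1, ih (k + 1) (n + 2 ^ k) (by rw [Nat.pow_succ]; omega)]
      congr 1
      simp [pvBits, hp, Nat.pow_succ]
      ring
    · have hstep : (if p == 1 then PySem.Int.bor ((n : Nat) : Int) ((1 : Int) <<< ((k : Int)).toNat) else ((n : Nat) : Int))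
          = ((n : Nat) : Int) := by simp [hp]
      rw [hstep, hk1, ih (k + 1) n (by rw [Nat.pow_succ]; omega)]
      congr 1
      simp [pvBits, hp, Nat.pow_succ]
      ring

-- B's fold (over the reversed bit string) computes pvBits, Horner style
theorem pvB_fold (pl : List Int) (acc : Int) :
    (pl.reverse.map (fun v => if v == 1 then '1' else '0')).foldl
      (fun acc c => acc * 2 + (if c == '1' then 1 else 0)) acc
      = acc * 2 ^ pl.length + pvBits pl := by
  induction pl generalizing acc with
  | nil => simp [pvBits]
  | cons p r ih =>
    simp only [List.reverse_cons, List.map_append, List.foldl_append, List.map_cons,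
      List.map_nil, List.foldl_cons, List.foldl_nil, List.length_cons]
    rw [ih acc]
    by_cases hp : p = 1 <;>
      simp [hp, pvBits, pow_succ] <;> ring

theorem calculate_port_pull_eq (pl : List Int) (invert : Bool) :
    calculate_port_pull pl invert = ((pvBits pl : Nat) : Int) := by
  unfold calculate_port_pull
  have hif : (fun (value : Int) (ip : Int × Int) =>
      if invert then
        (if ip.2 == 1 then PySem.Int.bor value ((1 : Int) <<< ip.1.toNat) else value)
      else
        (if ip.2 == 1 then PySem.Int.bor value ((1 : Int) <<< ip.1.toNat) else value))
      = (fun (value : Int) (ip : Int × Int) =>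
        if ip.2 == 1 then PySem.Int.bor value ((1 : Int) <<< ip.1.toNat) else value) := by
    funext value ip; cases invert <;> rfl
  rw [hif]
  have := pvA_fold pl 0 0 (by norm_num)
  simpa using this

theorem calculate_port_pull_alt_eq (pl : List Int) (invert : Bool) :
    calculate_port_pull_alt pl invert = ((pvBits pl : Nat) : Int) := by
  unfold calculate_port_pull_alt
  by_cases hpl : pl.isEmpty
  · rw [if_pos hpl]
    rw [List.isEmpty_iff] at hpl
    simp [hpl, pvBits]
  · rw [if_neg hpl]
    have := pvB_fold pl 0
    simpa using this

-- ===== VERDICT (by name: the statement is the Claim_ definition above) =====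
theorem calculate_port_pull_spec : Claim_equal_calculate_port_pull := by
  intro pl invert _
  unfold Spec_calculate_port_pull
  rw [calculate_port_pull_eq, calculate_port_pull_alt_eq]
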